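-- pv_equiv track=rewrite | github.com/Jin-s-work/Algorithm | 프로그래머스/2/131704. 택배상자/택배상자.py | solution
-- ===== SOURCE A (Python) =====
-- def solution(order):
--     answer = 0
--
--     st = []
--     n = len(order)
--     i = 1
--     now = 0
--     while i < n + 1:
--         st.append(i)
--         while st[-1] == order[now]:
--             now += 1
--             st.pop()
--             if len(st) == 0:
--                 break
--         i += 1
--
--     return now
-- ===== SOURCE B (Python) =====
-- def solution(order):
--     # Target-driven simulation: for each target, feed belt boxes 1..n onto the
--     # stack until the top matches, then pop it; stop at the first unservable target.
--     n = len(order)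
--     st = []
--     belt = 1
--     count = 0
--     for target in order:
--         while (not st or st[-1] != target) and belt <= n:
--             st.append(belt)
--             belt += 1
--         if st and st[-1] == target:
--             st.pop()
--             count += 1
--         else:
--             break
--     return count
-- ===== Notes on version B (the rewrite author's own statement) =====
-- stated objective: alternative
-- what changed: A's outer loop is driven by the belt (push each box 1..n, then pop while the top matches the next target); B inverts the decomposition: the outer loop iterates over the targets, and an inner loop feeds belt boxes onto the stack until the top matches the current target, breaking at the first unservable target.
import Mathlib
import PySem

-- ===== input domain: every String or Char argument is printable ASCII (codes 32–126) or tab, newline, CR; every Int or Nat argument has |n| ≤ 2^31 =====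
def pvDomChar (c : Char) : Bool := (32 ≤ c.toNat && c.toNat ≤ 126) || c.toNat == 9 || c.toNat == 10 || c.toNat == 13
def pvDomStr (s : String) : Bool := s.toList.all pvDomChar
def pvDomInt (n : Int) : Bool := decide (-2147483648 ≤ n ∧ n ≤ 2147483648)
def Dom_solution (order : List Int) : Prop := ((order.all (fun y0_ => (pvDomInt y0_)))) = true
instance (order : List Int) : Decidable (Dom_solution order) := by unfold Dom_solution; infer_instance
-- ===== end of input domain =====

-- B inverts A's decomposition: the outer loop runs over the targets (with an inner belt-feeding
-- loop) instead of over the belt (with an inner pop loop); same cost, equal return value everywhere.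
-- Stacks are stored top-first: 'x :: st' / head here mirror Python's append / st[-1] / pop at the end.

-- ===== PORT A =====
-- inner 'while st[-1] == order[now]: now += 1; st.pop(); if len(st)==0: break'
-- (st[-1] == order[now] ported via pyGet?; Python's IndexError there is unreachable: now < len(order)
-- whenever the stack is nonempty, since pops never exceed pushes)
def popA (order : List Int) : List Int → Int → List Int × Int
  | [], now => ([], now)
  | t :: rest, now =>
      if PySem.List.pyGet? order now = some t then popA order rest (now + 1)
      else (t :: rest, now)

-- outer 'while i < n + 1: st.append(i); <inner>; i += 1' as a fold over range(1, n+1)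
def solution (order : List Int) : Int :=
  let n : Int := order.length
  let fin := (PySem.List.pyRange 1 (n + 1) 1).foldl
      (fun (s : List Int × Int) i => popA order (i :: s.1) s.2) ([], 0)
  fin.2

-- ===== PORT B =====
-- inner 'while (not st or st[-1] != target) and belt <= n: st.append(belt); belt += 1'
def pushUntil (n t : Int) : List Int → Int → List Int × Int
  | st, belt =>
      if st.head? ≠ some t ∧ belt ≤ n then pushUntil n t (belt :: st) (belt + 1)
      else (st, belt)
termination_by st belt => (n + 1 - belt).toNat
decreasing_by omega

-- outer 'for target in order: <inner>; if st and st[-1]==target: st.pop(); count+=1 else break'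
def goB (n : Int) : List Int → List Int → Int → Int → Int
  | [], _, _, count => count
  | t :: ts, st, belt, count =>
      let p := pushUntil n t st belt
      match p.1 with
      | top :: rest => if top = t then goB n ts rest p.2 (count + 1) else count
      | [] => count

def solution_alt (order : List Int) : Int :=
  goB (order.length : Int) order [] 1 0

-- ===== PRECONDITION & SPEC =====
def Spec_solution (order : List Int) (out : Int) : Prop := out = solution_alt order
instance (order : List Int) (out : Int) : Decidable (Spec_solution order out) := by unfold Spec_solution; infer_instance

-- ===== CLAIM (what is proved, stated in full; the proofs are below) =====
def Claim_equal_solution : Prop := ∀ (order : List Int), Dom_solution order → Spec_solution order (solution order)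

-- ===== LEMMAS AND PROOFS =====

-- A small-step machine both ports simulate: pop when the top matches the current target,
-- otherwise push the next belt box, otherwise halt returning 'now'.
def run (order : List Int) : List Int → Int → Int → Int
  | t :: rest, belt, now =>
      if PySem.List.pyGet? order now = some t then run order rest belt (now + 1)
      else if belt ≤ (order.length : Int) then run order (belt :: t :: rest) (belt + 1) now
      else now
  | [], belt, now =>
      if belt ≤ (order.length : Int) then run order [belt] (belt + 1) now
      else now
termination_by st belt _ => 2 * ((order.length : Int) + 1 - belt).toNat + st.length
decreasing_by all_goals (simp only [List.length_cons, List.length_nil]; omega)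

-- the pop loop of A is a run of the machine's pop steps
theorem run_popA (order : List Int) (st : List Int) (belt now : Int) :
    run order st belt now = run order (popA order st now).1 belt (popA order st now).2 := by
  induction st generalizing now with
  | nil => simp [popA]
  | cons t rest ih =>
      by_cases h : PySem.List.pyGet? order now = some t
      · rw [popA, if_pos h, run, if_pos h]; exact ih (now + 1)
      · rw [popA, if_neg h]

-- the invariant popA leaves behind: the machine cannot pop
theorem popA_exit (order : List Int) (st : List Int) (now : Int) :
    ∀ t rest, (popA order st now).1 = t :: rest →
      ¬ PySem.List.pyGet? order (popA order st now).2 = some t := by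
  induction st generalizing now with
  | nil => intro t rest h; simp [popA] at h
  | cons a as ih =>
      intro t rest h
      by_cases hm : PySem.List.pyGet? order now = some a
      · rw [popA, if_pos hm] at h ⊢; exact ih (now + 1) t rest h
      · rw [popA, if_neg hm] at h ⊢
        obtain ⟨h1, _⟩ := List.cons.injEq .. ▸ h
        simpa [← h1] using hm

-- A's outer fold over the belt range equals the machine
theorem foldA_run (order : List Int) (belt : Int) (hb : 1 ≤ belt) :
    ∀ st now, (st = [] ∨ ∀ t rest, st = t :: rest → ¬ PySem.List.pyGet? order now = some t) →
      ((PySem.List.pyRange belt ((order.length : Int) + 1) 1).foldl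
        (fun (s : List Int × Int) i => popA order (i :: s.1) s.2) (st, now)).2
      = run order st belt now := by
  have H : ∀ k : Nat, ∀ belt : Int, 1 ≤ belt → ((order.length : Int) + 1 - belt).toNat = k →
      ∀ st now, (st = [] ∨ ∀ t rest, st = t :: rest → ¬ PySem.List.pyGet? order now = some t) →
      ((PySem.List.pyRange belt ((order.length : Int) + 1) 1).foldl
        (fun (s : List Int × Int) i => popA order (i :: s.1) s.2) (st, now)).2
      = run order st belt now := by
    intro k
    induction k with
    | zero =>
        intro belt hb hk st now hinv
        have hge : (order.length : Int) + 1 ≤ belt := by omega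
        rw [PySem.List.pyRange_one_eq_nil hge]
        cases st with
        | nil => rw [run, if_neg (by omega)]; rfl
        | cons t rest =>
            rw [run, if_neg (hinv.resolve_left (by simp) t rest rfl), if_neg (by omega)]
            rfl
    | succ k ih =>
        intro belt hb hk st now hinv
        have hlt : belt < (order.length : Int) + 1 := by omega
        rw [PySem.List.pyRange_one_cons hlt, List.foldl_cons]
        -- the machine pushes (invariant forbids a pop), then runs popA's pop steps
        have hpush : run order st belt now = run order (belt :: st) (belt + 1) now := by
          cases st with
          | nil =>
              conv_lhs => rw [run]
              rw [if_pos (by omega)]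
          | cons t rest =>
              conv_lhs => rw [run]
              rw [if_neg (hinv.resolve_left (by simp) t rest rfl), if_pos (by omega)]
        rw [hpush, run_popA order (belt :: st) (belt + 1) now]
        exact ih (belt + 1) (by omega) (by omega) _ _
          (Or.inr (popA_exit order (belt :: st) now))
  intro st now hinv
  exact H (((order.length : Int) + 1 - belt).toNat) belt hb rfl st now hinv

-- past the last target the machine only pushes and returns 'now' unchanged
theorem run_no_target (order : List Int) (k : Nat) (hk : order.length ≤ k) :
    ∀ st belt, run order st belt (k : Int) = (k : Int) := by
  have hnone : PySem.List.pyGet? order (k : Int) = none := by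
    rw [PySem.List.pyGet?_natCast]
    exact List.getElem?_eq_none hk
  have H : ∀ m : Nat, ∀ belt : Int, ((order.length : Int) + 1 - belt).toNat = m →
      ∀ st, run order st belt (k : Int) = (k : Int) := by
    intro m
    induction m with
    | zero =>
        intro belt hm st
        cases st with
        | nil => rw [run, if_neg (by omega)]
        | cons t rest => rw [run, if_neg (by simp [hnone]), if_neg (by omega)]
    | succ m ih =>
        intro belt hm st
        cases st with
        | nil => rw [run, if_pos (by omega)]; exact ih (belt + 1) (by omega) _
        | cons t rest =>
            rw [run, if_neg (by simp [hnone]), if_pos (by omega)]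
            exact ih (belt + 1) (by omega) _
  intro st belt
  exact H (((order.length : Int) + 1 - belt).toNat) belt rfl st

-- B's belt-feeding loop equals the machine's push phase at a live target
theorem run_pushUntil (order : List Int) (t : Int) (k : Nat)
    (ht : PySem.List.pyGet? order (k : Int) = some t) :
    ∀ st belt,
      run order st belt (k : Int)
      = (match (pushUntil (order.length : Int) t st belt).1 with
         | top :: rest => if top = t then
              run order rest (pushUntil (order.length : Int) t st belt).2 ((k : Int) + 1)
            else (k : Int)
         | [] => (k : Int)) := by
  have H : ∀ m : Nat, ∀ belt : Int, ((order.length : Int) + 1 - belt).toNat = m →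
      ∀ st,
      run order st belt (k : Int)
      = (match (pushUntil (order.length : Int) t st belt).1 with
         | top :: rest => if top = t then
              run order rest (pushUntil (order.length : Int) t st belt).2 ((k : Int) + 1)
            else (k : Int)
         | [] => (k : Int)) := by
    intro m
    induction m with
    | zero =>
        intro belt hm st
        have hb : ¬ belt ≤ (order.length : Int) := by omega
        rw [pushUntil, if_neg (by simp [hb])]
        cases st with
        | nil => rw [run, if_neg hb]
        | cons a rest =>
            by_cases hat : a = t
            · subst hat; rw [run, if_pos ht]; simp
            · have hne : PySem.List.pyGet? order (k : Int) ≠ some a := by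
                rw [ht]; intro h; exact hat (Option.some.inj h).symm
              rw [run, if_neg hne, if_neg hb]
              simp [hat]
    | succ m ih =>
        intro belt hm st
        have hb : belt ≤ (order.length : Int) := by omega
        cases st with
        | nil =>
            rw [pushUntil, if_pos (by simp [hb]), run, if_pos hb]
            exact ih (belt + 1) (by omega) [belt]
        | cons a rest =>
            by_cases hat : a = t
            · subst hat
              rw [pushUntil, if_neg (by simp), run, if_pos ht]
              simp
            · have hne : PySem.List.pyGet? order (k : Int) ≠ some a := by
                rw [ht]; intro h; exact hat (Option.some.inj h).symm
              rw [pushUntil, if_pos (by simp [hat, hb]), run, if_neg hne, if_pos hb]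
              exact ih (belt + 1) (by omega) (belt :: a :: rest)
  intro st belt
  exact H (((order.length : Int) + 1 - belt).toNat) belt rfl st

-- B's target loop equals the machine
theorem goB_run (order : List Int) :
    ∀ k : Nat, ∀ st belt,
      goB (order.length : Int) (order.drop k) st belt (k : Int) = run order st belt (k : Int) := by
  intro k
  have H : ∀ m : Nat, ∀ k : Nat, (order.drop k).length = m → ∀ st belt,
      goB (order.length : Int) (order.drop k) st belt (k : Int) = run order st belt (k : Int) := by
    intro m
    induction m with
    | zero =>
        intro k hm st belt
        have hk : order.length ≤ k := by
          have := List.length_drop (l := order) (i := k); omega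
        rw [List.drop_eq_nil_of_le hk, goB, run_no_target order k hk]
    | succ m ih =>
        intro k hm st belt
        have hk : k < order.length := by
          have := List.length_drop (l := order) (i := k); omega
        obtain ⟨t, hts⟩ : ∃ t, order.drop k = t :: order.drop (k + 1) := by
          refine ⟨order[k], ?_⟩
          rw [List.drop_eq_getElem_cons hk]
        have ht : PySem.List.pyGet? order (k : Int) = some t := by
          rw [PySem.List.pyGet?_natCast]
          have : order[k]? = some order[k] := List.getElem?_eq_getElem hk
          rw [this]
          have : t = order[k] := by
            have := congrArg (List.head?) hts
            simpa [List.head?_drop, List.getElem?_eq_getElem hk] using this.symm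
          rw [this]
        rw [hts, goB, run_pushUntil order t k ht st belt]
        cases hp : (pushUntil (order.length : Int) t st belt).1 with
        | nil => simp
        | cons top rest =>
            by_cases htop : top = t
            · simp only [htop, reduceIte]
              have : ((k : Int) + 1) = ((k + 1 : Nat) : Int) := by push_cast; ring
              rw [this]
              exact (ih (k + 1) (by rw [hts] at hm; simpa using hm) rest _)
            · simp [htop]
  exact H ((order.drop k).length) k rfl

-- ===== VERDICT (by name: the statement is the Claim_ definition above) =====
theorem solution_spec : Claim_equal_solution := by
  intro order _
  unfold Spec_solution solution solution_alt
  have hA := foldA_run order 1 le_rfl [] 0 (Or.inl rfl)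
  simp only at hA
  rw [hA]
  have hB := goB_run order 0 [] 1
  simpa using hB.symm
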